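-- pv_equiv track=rewrite | github.com/ankurbhambri/DS-Algo | graph/problems/2D grid problems/tetris-game.py | find_min_obstacles
-- ===== SOURCE A (Python) =====
-- def find_min_obstacles(matrix):
--     rows, cols = len(matrix), len(matrix[0])
--     obstacles_removed = 0
--
--     for i in range(rows - 1, -1, -1):  # starting from last row
--         for j in range(cols):
--             if matrix[i][j] == "*":
--                 # Find the nearest obstacle below, if any
--                 next_row = i + 1
--                 while next_row < rows and matrix[next_row][j] == ".":
--                     next_row += 1
--
--                 if next_row < rows and matrix[next_row][j] == "#":
--                     obstacles_removed += 1
--                     matrix[next_row][j] = "."  # Remove the obstacle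
--
--     return obstacles_removed
-- ===== SOURCE B (Python) =====
-- def find_min_obstacles(matrix):
--     cols = len(matrix[0])
--     below = ["."] * cols
--     count = 0
--     for row in reversed(matrix):
--         for j in range(cols):
--             cell = row[j]
--             if cell != ".":
--                 if cell == "*" and below[j] == "#":
--                     count += 1
--                 below[j] = cell
--     return count
-- ===== Notes on version B (the rewrite author's own statement) =====
-- stated objective: alternative
-- what changed: Replaces A's per-star downward re-scan and in-place removal of '#' cells by a single bottom-up pass that keeps, per column, the nearest non-'.' cell seen so far in a 'below' array (A mutates its argument, B does not; return values agree).
-- outside the precondition, e.g. on find_min_obstacles([]): A raises IndexError, B raises IndexError; on find_min_obstacles([['*', '.'], ['#']]): A raises IndexError, B raises IndexError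
import Mathlib
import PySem

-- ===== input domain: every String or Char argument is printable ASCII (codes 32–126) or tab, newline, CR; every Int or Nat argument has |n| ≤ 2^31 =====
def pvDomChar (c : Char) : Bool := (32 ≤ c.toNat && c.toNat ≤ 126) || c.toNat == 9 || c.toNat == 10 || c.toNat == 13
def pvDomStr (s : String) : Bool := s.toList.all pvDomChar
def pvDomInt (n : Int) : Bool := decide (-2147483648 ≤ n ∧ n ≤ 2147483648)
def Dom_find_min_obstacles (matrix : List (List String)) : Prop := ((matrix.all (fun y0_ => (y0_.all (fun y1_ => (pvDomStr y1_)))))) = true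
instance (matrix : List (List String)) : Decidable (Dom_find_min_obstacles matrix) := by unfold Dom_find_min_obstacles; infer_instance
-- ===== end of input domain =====

-- B replaces A's per-star downward re-scan and in-place '#'-removal by a single bottom-up pass
-- keeping, per column, the nearest non-'.' cell seen so far in a "below" array (objective: alternative).
-- Equivalence is about the RETURN value only: Python A mutates its argument (removed '#' become '.'), B does not.

-- ===== PORT A =====
-- while next_row < rows and matrix[next_row][j] == ".": next_row += 1
def scanA (m : List (List String)) (j rows b : Nat) : Nat :=
  if _h : b < rows then
    if (m.getD b []).getD j "" = "." then scanA m j rows (b + 1) else b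
  else b
termination_by rows - b

-- body of the inner `for j in range(cols)` loop, state = (matrix, obstacles_removed)
def cellA (rows i : Nat) (st : List (List String) × Int) (j : Nat) : List (List String) × Int :=
  if (st.1.getD i []).getD j "" = "*" then
    let k := scanA st.1 j rows (i + 1)
    if k < rows ∧ (st.1.getD k []).getD j "" = "#" then
      (st.1.set k ((st.1.getD k []).set j "."), st.2 + 1)
    else st
  else st

def find_min_obstacles (matrix : List (List String)) : Int :=
  let rows := matrix.length
  let cols := (matrix.headD []).length      -- len(matrix[0]); Pre_ excludes the empty matrix, where Python raises
  -- for i in range(rows-1, -1, -1): for j in range(cols): …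
  (((List.range rows).reverse).foldl
      (fun st i => (List.range cols).foldl (cellA rows i) st) (matrix, (0 : Int))).2

-- ===== PORT B =====
-- body of the inner `for j in range(cols)` loop, state = (below, count)
def cellB (row : List String) (st : List String × Int) (j : Nat) : List String × Int :=
  let cell := row.getD j ""
  if cell ≠ "." then
    (st.1.set j cell, if cell = "*" ∧ st.1.getD j "" = "#" then st.2 + 1 else st.2)
  else st

def find_min_obstacles_alt (matrix : List (List String)) : Int :=
  let cols := (matrix.headD []).length
  -- for row in reversed(matrix): for j in range(cols): …
  ((matrix.reverse).foldl
      (fun st row => (List.range cols).foldl (cellB row) st)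
      (List.replicate cols ".", (0 : Int))).2

-- ===== PRECONDITION & SPEC =====
-- Pre_ excludes exactly the inputs where Python A raises IndexError: the empty matrix (len(matrix[0]))
-- and matrices with a row shorter than the first row (matrix[i][j] out of range).
def Pre_find_min_obstacles (matrix : List (List String)) : Prop :=
  matrix ≠ [] ∧ ∀ row ∈ matrix, (matrix.headD []).length ≤ row.length
instance (matrix : List (List String)) : Decidable (Pre_find_min_obstacles matrix) := by
  unfold Pre_find_min_obstacles; infer_instance

def pvWitness_find_min_obstacles : List (List String) :=
  [["*", "."], [".", "#"], ["#", "*"]]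

def Spec_find_min_obstacles (matrix : List (List String)) (out : Int) : Prop := out = find_min_obstacles_alt matrix
instance (matrix : List (List String)) (out : Int) : Decidable (Spec_find_min_obstacles matrix out) := by unfold Spec_find_min_obstacles; infer_instance

-- ===== CLAIM (what is proved, stated in full; the proofs are below) =====
def Claim_equal_find_min_obstacles : Prop := ∀ (matrix : List (List String)), Dom_find_min_obstacles matrix → Pre_find_min_obstacles matrix → Spec_find_min_obstacles matrix (find_min_obstacles matrix)

-- ===== LEMMAS AND PROOFS =====

-- first non-"." entry of a column suffix ("." if none)
def fnd : List String → String
  | [] => "."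
  | x :: t => if x = "." then fnd t else x

-- invariant during the processing of row i: columns < a have been processed for row i
-- (their "below" summarises rows ≥ i of the current A-matrix m), columns ≥ a not yet (rows ≥ i+1);
-- rows ≤ i of m are still the original matrix.
def InvAB (matrix : List (List String)) (cols i a : Nat) (m : List (List String)) (below : List String) : Prop :=
  m.length = matrix.length ∧ below.length = cols ∧
  (∀ k, k ≤ i → m.getD k [] = matrix.getD k []) ∧
  (∀ j, j < cols → below.getD j "" = fnd ((m.drop (if j < a then i else i + 1)).map (fun r => r.getD j "")))

theorem getD_set_self {α : Type} (l : List α) (k : Nat) (x d : α) (h : k < l.length) :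
    (l.set k x).getD k d = x := by simp [List.getD, h]

theorem getD_set_ne {α : Type} (l : List α) (k t : Nat) (x d : α) (h : k ≠ t) :
    (l.set k x).getD t d = l.getD t d := by simp [List.getD, h]

theorem drop_map_getD (m : List (List String)) (i : Nat) (h : i < m.length)
    (g : List String → String) :
    (m.drop i).map g = g (m.getD i []) :: (m.drop (i + 1)).map g := by
  have e : m.getD i [] = m[i] := by simp [List.getD, List.getElem?_eq_getElem h]
  rw [List.drop_eq_getElem_cons h, List.map_cons, e]

theorem map_drop_congr (g : List String → String) (b : Nat) (m m' : List (List String))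
    (hl : m'.length = m.length) (h : ∀ t, b ≤ t → g (m'.getD t []) = g (m.getD t [])) :
    (m'.drop b).map g = (m.drop b).map g := by
  apply List.ext_getElem
  · simp [hl]
  · intro idx h1 h2
    simp only [List.getElem_map, List.getElem_drop]
    have e1 : (m'.getD (b + idx) []) = m'[b + idx]'(by simp at h1; omega) := by
      simp [List.getD, List.getElem?_eq_getElem (by simp at h1; omega : b + idx < m'.length)]
    have e2 : (m.getD (b + idx) []) = m[b + idx]'(by simp at h2; omega) := by
      simp [List.getD, List.getElem?_eq_getElem (by simp at h2; omega : b + idx < m.length)]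
    rw [← e1, ← e2]; exact h _ (Nat.le_add_right _ _)

theorem scan_ge (m : List (List String)) (j rows : Nat) : ∀ b, b ≤ scanA m j rows b := by
  intro b
  fun_induction scanA m j rows b with
  | case1 b h hdot ih => omega
  | case2 b h hdot => exact le_refl _
  | case3 b h => exact le_refl _

theorem scan_spec (m : List (List String)) (j rows : Nat) (hr : rows = m.length) (b : Nat) :
    ((scanA m j rows b < rows ∧ (m.getD (scanA m j rows b) []).getD j "" = "#")) ↔
      fnd ((m.drop b).map (fun r => r.getD j "")) = "#" := by
  fun_induction scanA m j rows b with
  | case1 b h hdot ih =>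
      rw [drop_map_getD m b (by omega) _]
      simp only [fnd]
      rw [if_pos hdot]
      exact ih
  | case2 b h hdot =>
      rw [drop_map_getD m b (by omega) _]
      simp only [fnd]
      rw [if_neg hdot]
      exact ⟨fun hx => hx.2, fun hx => ⟨h, hx⟩⟩
  | case3 b h =>
      rw [List.drop_eq_nil_of_le (by omega)]
      simp only [List.map_nil, fnd]
      exact ⟨fun hx => absurd hx.1 h, fun hx => absurd hx (by decide)⟩

theorem fnd_shift (m : List (List String)) (i j : Nat) (hi : i < m.length) :
    fnd ((m.drop i).map (fun r => r.getD j "")) =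
      (if (m.getD i []).getD j "" = "." then fnd ((m.drop (i + 1)).map (fun r => r.getD j ""))
       else (m.getD i []).getD j "") := by
  rw [drop_map_getD m i hi]; simp only [fnd]

theorem inner_step (matrix : List (List String)) (cols i : Nat) (hi : i < matrix.length) :
    ∀ (c a : Nat) (m : List (List String)) (below : List String) (n : Int),
      a + c = cols → InvAB matrix cols i a m below →
      InvAB matrix cols i cols
          ((List.range' a c).foldl (cellA matrix.length i) (m, n)).1
          ((List.range' a c).foldl (cellB (matrix.getD i [])) (below, n)).1
        ∧ ((List.range' a c).foldl (cellA matrix.length i) (m, n)).2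
            = ((List.range' a c).foldl (cellB (matrix.getD i [])) (below, n)).2 := by
  intro c
  induction c with
  | zero =>
      intro a m below n hac hinv
      have ha : a = cols := by omega
      subst ha
      exact ⟨hinv, rfl⟩
  | succ c ih =>
      intro a m below n hac hinv
      obtain ⟨hml, hbl, hup, hcol⟩ := hinv
      have ha : a < cols := by omega
      have him : i < m.length := by rw [hml]; exact hi
      rw [List.range'_succ, List.foldl_cons, List.foldl_cons]
      have hcellA : (m.getD i []).getD a "" = (matrix.getD i []).getD a "" := by
        rw [hup i (le_refl i)]
      have hsame : ∀ j, j ≠ a →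
          (if j < a + 1 then i else i + 1) = (if j < a then i else i + 1) := by
        intro j hja
        by_cases h1 : j < a
        · rw [if_pos (by omega), if_pos h1]
        · rw [if_neg (by omega), if_neg h1]
      by_cases hdot : (matrix.getD i []).getD a "" = "."
      · -- cell is "." : both sides do nothing; column a's boundary moves to i
        have eA : cellA matrix.length i (m, n) a = (m, n) := by
          simp only [cellA]
          rw [if_neg (by rw [hcellA, hdot]; decide)]
        have eB : cellB (matrix.getD i []) (below, n) a = (below, n) := by
          simp only [cellB]
          rw [if_neg (not_not_intro hdot)]
        rw [eA, eB]
        refine ih (a + 1) m below n (by omega) ⟨hml, hbl, hup, ?_⟩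
        intro j hj
        by_cases hja : j = a
        · subst hja
          rw [if_pos (by omega), fnd_shift m i j him,
              if_pos (by rw [hup i (le_refl i)]; exact hdot)]
          have h0 := hcol j hj
          rwa [if_neg (lt_irrefl j)] at h0
        · rw [hsame j hja]; exact hcol j hj
      · by_cases hstar : (matrix.getD i []).getD a "" = "*"
        · -- cell is "*"
          have hbelow_a : below.getD a "" = fnd ((m.drop (i + 1)).map (fun r => r.getD a "")) := by
            have h0 := hcol a ha; rwa [if_neg (lt_irrefl a)] at h0
          have hspec := scan_spec m a matrix.length hml.symm (i + 1)
          have hk_ge : i + 1 ≤ scanA m a matrix.length (i + 1) := scan_ge m a matrix.length (i + 1)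
          by_cases hb : below.getD a "" = "#"
          · -- a '#' is hit: A removes it in place, B bumps the count the same way
            have hcond : scanA m a matrix.length (i + 1) < matrix.length ∧
                (m.getD (scanA m a matrix.length (i + 1)) []).getD a "" = "#" :=
              hspec.mpr (by rw [← hbelow_a]; exact hb)
            have hkm : scanA m a matrix.length (i + 1) < m.length := by rw [hml]; exact hcond.1
            have eA : cellA matrix.length i (m, n) a =
                (m.set (scanA m a matrix.length (i + 1))
                   ((m.getD (scanA m a matrix.length (i + 1)) []).set a "."), n + 1) := by
              simp only [cellA]
              rw [if_pos (by rw [hcellA]; exact hstar), if_pos hcond]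
            have eB : cellB (matrix.getD i []) (below, n) a = (below.set a "*", n + 1) := by
              simp only [cellB]
              rw [hstar, if_pos (by decide), if_pos ⟨rfl, hb⟩]
            rw [eA, eB]
            refine ih (a + 1) _ _ (n + 1) (by omega) ⟨?_, ?_, ?_, ?_⟩
            · rw [List.length_set]; exact hml
            · rw [List.length_set]; exact hbl
            · intro t ht
              rw [getD_set_ne m _ t _ _ (by omega)]
              exact hup t ht
            · intro j hj
              by_cases hja : j = a
              · subst hja
                rw [if_pos (by omega),
                    getD_set_self below j "*" "" (by rw [hbl]; exact hj),
                    fnd_shift _ i j (by rw [List.length_set]; exact him),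
                    getD_set_ne m _ i _ _ (by omega), hup i (le_refl i), hstar,
                    if_neg (by decide)]
              · rw [getD_set_ne below a j _ _ (fun h => hja h.symm), hsame j hja,
                    map_drop_congr (fun r => r.getD j "") _ m _
                      (by rw [List.length_set]) ?_]
                · exact hcol j hj
                · intro t ht
                  by_cases htk : t = scanA m a matrix.length (i + 1)
                  · rw [htk]
                    simp only
                    rw [getD_set_self m _ _ [] hkm,
                        getD_set_ne (m.getD (scanA m a matrix.length (i + 1)) []) a j _ _
                          (fun h => hja h.symm)]
                  · simp only
                    rw [getD_set_ne m _ t _ _ (fun h => htk h.symm)]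
          · -- below is not '#': neither side counts; B records the star as the new blocker
            have eA : cellA matrix.length i (m, n) a = (m, n) := by
              simp only [cellA]
              rw [if_pos (by rw [hcellA]; exact hstar),
                  if_neg (fun hc => hb (by rw [hbelow_a]; exact hspec.mp hc))]
            have eB : cellB (matrix.getD i []) (below, n) a = (below.set a "*", n) := by
              simp only [cellB]
              rw [hstar, if_pos (by decide), if_neg (fun hc => hb hc.2)]
            rw [eA, eB]
            refine ih (a + 1) m _ n (by omega) ⟨hml, by rw [List.length_set]; exact hbl, hup, ?_⟩
            intro j hj
            by_cases hja : j = a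
            · subst hja
              rw [if_pos (by omega), getD_set_self below j "*" "" (by rw [hbl]; exact hj),
                  fnd_shift m i j him, hup i (le_refl i), hstar, if_neg (by decide)]
            · rw [getD_set_ne below a j _ _ (fun h => hja h.symm), hsame j hja]
              exact hcol j hj
        · -- some other non-"." cell: A ignores it, B records it as the new blocker
          have eA : cellA matrix.length i (m, n) a = (m, n) := by
            simp only [cellA]
            rw [if_neg (by rw [hcellA]; exact hstar)]
          have eB : cellB (matrix.getD i []) (below, n) a =
              (below.set a ((matrix.getD i []).getD a ""), n) := by
            simp only [cellB]
            rw [if_pos hdot, if_neg (fun hc => hstar hc.1)]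
          rw [eA, eB]
          refine ih (a + 1) m _ n (by omega) ⟨hml, by rw [List.length_set]; exact hbl, hup, ?_⟩
          intro j hj
          by_cases hja : j = a
          · subst hja
            rw [if_pos (by omega), getD_set_self below j _ "" (by rw [hbl]; exact hj),
                fnd_shift m i j him, hup i (le_refl i), if_neg hdot]
          · rw [getD_set_ne below a j _ _ (fun h => hja h.symm), hsame j hja]
            exact hcol j hj

theorem outer_loop (matrix : List (List String)) (cols : Nat) :
    ∀ (i : Nat), i ≤ matrix.length → ∀ (m : List (List String)) (below : List String) (n : Int),
      (m.length = matrix.length ∧ below.length = cols ∧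
       (∀ k, k < i → m.getD k [] = matrix.getD k []) ∧
       (∀ j, j < cols → below.getD j "" = fnd ((m.drop i).map (fun r => r.getD j "")))) →
      (((List.range i).reverse).foldl
          (fun st i' => (List.range cols).foldl (cellA matrix.length i') st) (m, n)).2
        = (((matrix.take i).reverse).foldl
            (fun st row => (List.range cols).foldl (cellB row) st) (below, n)).2 := by
  intro i
  induction i with
  | zero => intro _ m below n _; simp
  | succ i ih =>
      intro hle m below n hinv
      obtain ⟨hml, hbl, hup, hcol⟩ := hinv
      have hi : i < matrix.length := by omega
      rw [show (List.range (i + 1)).reverse = i :: (List.range i).reverse by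
            simp [List.range_succ],
          show (matrix.take (i + 1)).reverse = matrix.getD i [] :: (matrix.take i).reverse by
            rw [List.take_add_one, List.getElem?_eq_getElem hi]
            simp [List.getD, List.getElem?_eq_getElem hi],
          List.foldl_cons, List.foldl_cons]
      have hstep := inner_step matrix cols i hi cols 0 m below n (by omega)
        ⟨hml, hbl, (fun k hk => hup k (by omega)), (fun j hj => by
          rw [if_neg (by omega)]; exact hcol j hj)⟩
      rw [← List.range_eq_range'] at hstep
      obtain ⟨⟨hml', hbl', hup', hcol'⟩, hcnt⟩ := hstep
      have e : (((List.range cols).foldl (cellB (matrix.getD i [])) (below, n)).1,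
                ((List.range cols).foldl (cellA matrix.length i) (m, n)).2) =
               ((List.range cols).foldl (cellB (matrix.getD i [])) (below, n)) := by
        rw [hcnt]
      have hrec := ih (by omega)
        ((List.range cols).foldl (cellA matrix.length i) (m, n)).1
        ((List.range cols).foldl (cellB (matrix.getD i [])) (below, n)).1
        ((List.range cols).foldl (cellA matrix.length i) (m, n)).2
        ⟨hml', hbl', (fun k hk => hup' k (by omega)), (fun j hj => by
          have h0 := hcol' j hj
          rwa [if_pos hj] at h0)⟩
      rw [e] at hrec
      exact hrec

-- ===== VERDICT (by name: the statement is the Claim_ definition above) =====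
theorem find_min_obstacles_spec : Claim_equal_find_min_obstacles := by
  intro matrix _ _
  unfold Spec_find_min_obstacles find_min_obstacles find_min_obstacles_alt
  have h := outer_loop matrix (matrix.headD []).length matrix.length (le_refl _) matrix
      (List.replicate (matrix.headD []).length ".") 0
      (by
        refine ⟨rfl, by simp, fun k hk => rfl, fun j hj => ?_⟩
        rw [List.drop_length]
        have hj' : j < (matrix.head?.getD []).length := by
          rwa [← List.headD_eq_head?_getD]
        simp [List.getD, hj', fnd])
  simpa using h
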